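-- pv_equiv track=rewrite | github.com/pypi-data/pypi-mirror-401 | packages/kxy-framework/kxy_framework-1.4.13-py3-none-any.whl/kxy/framework/generat_contact.py | remove_type_annotations
-- ===== SOURCE A (Python) =====
-- def remove_type_annotations(params: str) -> str:
--     """
--     移除参数字符串中的类型注解，支持复杂类型如 Dict[str, object]
--
--     Args:
--         params (str): 参数字符串，如 "self, name: str, age: int = 18"
--
--     Returns:
--         str: 移除类型注解后的参数字符串，如 "self, name, age=18"
--     """
--     if not params:
--         return params
--
--     # 分割参数，但需要处理可能包含逗号的复杂类型注解
--     param_parts = []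
--     current_part = ""
--     bracket_count = 0
--     in_brackets = False
--
--     for char in params:
--         if char == ',' and bracket_count == 0:
--             param_parts.append(current_part.strip())
--             current_part = ""
--         else:
--             if char in '[({':
--                 bracket_count += 1
--                 in_brackets = True
--             elif char in '])}':
--                 bracket_count -= 1
--                 if bracket_count == 0:
--                     in_brackets = False
--             current_part += char
--
--     if current_part:
--         param_parts.append(current_part.strip())
--
--     cleaned_params = []
--
--     for param in param_parts:
--         param = param.strip()
--
--         # 处理 *args 和 **kwargs
--         if param.startswith('*'):
--             if ':' in param:
--                 # 分离参数名和类型注解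
--                 parts = param.split(':', 1)
--                 param_name = parts[0].strip()
--                 annotation_part = parts[1].strip()
--
--                 # 检查是否有默认值
--                 if '=' in annotation_part:
--                     annotation_and_default = annotation_part.split('=', 1)
--                     type_annotation = annotation_and_default[0].strip()
--                     default_value = annotation_and_default[1].strip()
--                     param = f"{param_name}={default_value}"
--                 else:
--                     param = param_name
--         elif ':' in param:
--             # 普通参数有类型注解
--             parts = param.split(':', 1)
--             param_name = parts[0].strip()
--             annotation_part = parts[1].strip()
--
--             # 检查是否有默认值
--             if '=' in annotation_part:
--                 annotation_and_default = annotation_part.split('=', 1)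
--                 type_annotation = annotation_and_default[0].strip()
--                 default_value = annotation_and_default[1].strip()
--                 param = f"{param_name}={default_value}"
--             else:
--                 param = param_name
--         # 否则保持原样（没有类型注解）
--
--         cleaned_params.append(param)
--
--     return ', '.join(cleaned_params)
-- ===== SOURCE B (Python) =====
-- def remove_type_annotations(params: str) -> str:
--     """Single left-to-right pass: split on top-level commas with a bracket-depth
--     counter while simultaneously separating each parameter into its name and
--     (optional) default, skipping the annotation between ':' and '='."""
--     out = []
--     depth = 0
--     seen_colon = False
--     seen_eq = False
--     name = []
--     default = []
--     for c in params:
--         if c == ',' and depth == 0: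
--             part = ''.join(name).strip()
--             if seen_colon and seen_eq:
--                 part += '=' + ''.join(default).strip()
--             out.append(part)
--             seen_colon = False
--             seen_eq = False
--             name = []
--             default = []
--         else:
--             if c in '[({':
--                 depth += 1
--             elif c in '])}':
--                 depth -= 1
--             if not seen_colon:
--                 if c == ':':
--                     seen_colon = True
--                 else:
--                     name.append(c)
--             elif not seen_eq:
--                 if c == '=':
--                     seen_eq = True
--             else:
--                 default.append(c)
--     if seen_colon or name:
--         part = ''.join(name).strip()
--         if seen_colon and seen_eq:
--             part += '=' + ''.join(default).strip()
--         out.append(part)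
--     return ', '.join(out)
-- ===== Notes on version B (the rewrite author's own statement) =====
-- stated objective: alternative
-- what changed: Replaces A's two phases (build a top-level-comma-split parts list, then per part strip and re-split on ':' and '='), by one left-to-right character pass that maintains a bracket-depth counter and seen-colon/seen-equals flags and accumulates each parameter's name and default directly.
import Mathlib
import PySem

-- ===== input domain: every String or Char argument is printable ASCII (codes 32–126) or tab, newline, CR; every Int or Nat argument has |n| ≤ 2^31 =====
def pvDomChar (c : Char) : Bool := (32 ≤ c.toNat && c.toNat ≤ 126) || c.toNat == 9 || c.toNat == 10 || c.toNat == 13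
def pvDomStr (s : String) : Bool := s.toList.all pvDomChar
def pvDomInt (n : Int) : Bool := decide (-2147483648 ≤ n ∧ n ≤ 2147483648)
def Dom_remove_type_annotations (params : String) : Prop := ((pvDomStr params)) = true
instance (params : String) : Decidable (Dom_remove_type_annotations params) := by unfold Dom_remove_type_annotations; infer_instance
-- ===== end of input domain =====

-- B replaces A's two phases (top-level comma split into a parts list, then per-part split-on-':'/split-on-'=')
-- by one left-to-right pass that separates name/annotation/default on the fly; alternative decomposition, return value only.

-- ===== PORT A =====

-- first loop of A: split on top-level commas, tracking bracket depth
def rtaStepA (st : List (List Char) × List Char × Int) (c : Char) :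
    List (List Char) × List Char × Int :=
  match st with
  | (parts, cur, bc) =>
    if c = ',' ∧ bc = 0 then
      (parts ++ [PySem.Chars.strip cur], [], bc)
    else
      let bc' := if c ∈ ['[', '(', '{'] then bc + 1
                 else if c ∈ [']', ')', '}'] then bc - 1 else bc
      (parts, cur ++ [c], bc')

-- the duplicated "split on ':' then on '='" block of A's second loop
def rtaAnnot (p : List Char) : List Char :=
  let parts := PySem.Chars.splitOnMax p [':'] 1
  let name := PySem.Chars.strip (parts.getD 0 [])
  let ann := PySem.Chars.strip (parts.getD 1 [])
  if PySem.Chars.isIn ['='] ann then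
    let ad := PySem.Chars.splitOnMax ann ['='] 1
    name ++ ['='] ++ PySem.Chars.strip (ad.getD 1 [])
  else name

-- second loop body of A
def rtaClean (param : List Char) : List Char :=
  let p := PySem.Chars.strip param
  if PySem.Chars.startswith p ['*'] then
    if PySem.Chars.isIn [':'] p then rtaAnnot p else p
  else
    if PySem.Chars.isIn [':'] p then rtaAnnot p else p

def remove_type_annotations (params : String) : String :=
  if params = "" then params
  else
    let st := params.toList.foldl rtaStepA ([], [], (0 : Int))
    let parts := if st.2.1 ≠ [] then st.1 ++ [PySem.Chars.strip st.2.1] else st.1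
    String.mk (PySem.Chars.join [',', ' '] (parts.map rtaClean))

-- ===== PORT B =====

structure RtaSt where
  out   : List (List Char)
  depth : Int
  col   : Bool
  eq    : Bool
  name  : List Char
  dfl   : List Char
deriving DecidableEq, Repr

-- finalize the parameter accumulated since the last top-level comma
def rtaFin (col eq : Bool) (name dfl : List Char) : List Char :=
  let part := PySem.Chars.strip name
  if col && eq then part ++ ['='] ++ PySem.Chars.strip dfl else part

def rtaStepB (st : RtaSt) (c : Char) : RtaSt :=
  if c = ',' ∧ st.depth = 0 then
    { out := st.out ++ [rtaFin st.col st.eq st.name st.dfl], depth := st.depth,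
      col := false, eq := false, name := [], dfl := [] }
  else
    let d := if c ∈ ['[', '(', '{'] then st.depth + 1
             else if c ∈ [']', ')', '}'] then st.depth - 1 else st.depth
    if !st.col then
      if c = ':' then { st with depth := d, col := true }
      else { st with depth := d, name := st.name ++ [c] }
    else if !st.eq then
      if c = '=' then { st with depth := d, eq := true }
      else { st with depth := d }
    else { st with depth := d, dfl := st.dfl ++ [c] }

def remove_type_annotations_alt (params : String) : String :=
  let st := params.toList.foldl rtaStepB ⟨[], 0, false, false, [], []⟩
  let out := if st.col || !st.name.isEmpty then
               st.out ++ [rtaFin st.col st.eq st.name st.dfl]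
             else st.out
  String.mk (PySem.Chars.join [',', ' '] out)

-- ===== PRECONDITION & SPEC =====
def Spec_remove_type_annotations (params : String) (out : String) : Prop := out = remove_type_annotations_alt params
instance (params : String) (out : String) : Decidable (Spec_remove_type_annotations params out) := by unfold Spec_remove_type_annotations; infer_instance

-- ===== CLAIM (what is proved, stated in full; the proofs are below) =====
def Claim_equal_remove_type_annotations : Prop := ∀ (params : String), Dom_remove_type_annotations params → Spec_remove_type_annotations params (remove_type_annotations params)

-- ===== LEMMAS AND PROOFS =====

def rtaBef (c : Char) (s : List Char) : List Char := s.takeWhile (· ≠ c)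
def rtaAft (c : Char) (s : List Char) : List Char := (s.dropWhile (· ≠ c)).tail

lemma goZero (c : Char) (fuel : Nat) (l cur : List Char) (acc : List (List Char)) :
    PySem.Chars.splitOnMax.go [c] fuel 0 l cur acc = ((cur.reverse ++ l) :: acc).reverse := by
  cases fuel with
  | zero => simp [PySem.Chars.splitOnMax.go]
  | succ n => cases l <;> simp [PySem.Chars.splitOnMax.go]

lemma goMem (c : Char) (l : List Char) (h : c ∈ l) :
    ∀ (fuel : Nat) (cur : List Char) (acc : List (List Char)), l.length + 1 ≤ fuel →
    PySem.Chars.splitOnMax.go [c] fuel 1 l cur acc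
      = ((rtaAft c l) :: (cur.reverse ++ rtaBef c l) :: acc).reverse := by
  induction l with
  | nil => simp at h
  | cons a t ih =>
    intro fuel cur acc hf
    cases fuel with
    | zero => simp at hf
    | succ n =>
      by_cases hca : a = c
      · subst hca
        have hp : [a].isPrefixOf (a :: t) = true := by simp [List.isPrefixOf]
        simp only [PySem.Chars.splitOnMax.go, hp, if_true]
        rw [goZero]
        simp [rtaAft, rtaBef, List.dropWhile_cons]
      · have hp : ¬ ([c].isPrefixOf (a :: t) = true) := by
          simp [List.isPrefixOf]; exact fun e => hca e.symm
        have hmem : c ∈ t := (List.mem_cons.mp h).resolve_left (fun e => hca e.symm)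
        simp only [PySem.Chars.splitOnMax.go, hp, if_false]
        rw [ih hmem n (a :: cur) acc (by simpa using hf)]
        simp [rtaAft, rtaBef, List.dropWhile_cons, List.takeWhile_cons, hca]

lemma rtaSplit_mem (c : Char) (s : List Char) (h : c ∈ s) :
    PySem.Chars.splitOnMax s [c] 1 = [rtaBef c s, rtaAft c s] := by
  unfold PySem.Chars.splitOnMax
  rw [if_neg (by norm_num), show Int.toNat 1 = 1 from rfl]
  rw [goMem c s h _ _ _ (by simp)]
  simp

def rtaP (st : Bool × Bool × List Char × List Char) (c : Char) :
    Bool × Bool × List Char × List Char :=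
  match st with
  | (col, eq, name, dfl) =>
    if !col then
      if c = ':' then (true, eq, name, dfl) else (col, eq, name ++ [c], dfl)
    else if !eq then
      if c = '=' then (col, true, name, dfl) else st
    else (col, eq, name, dfl ++ [c])

def rtaScan (q : List Char) : Bool × Bool × List Char × List Char :=
  q.foldl rtaP (false, false, [], [])

lemma rtaP3 (q n d : List Char) : q.foldl rtaP (true, true, n, d) = (true, true, n, d ++ q) := by
  induction q generalizing d with
  | nil => simp
  | cons c t ih => simp [List.foldl_cons, rtaP, ih]

lemma rtaP2 (q n : List Char) : q.foldl rtaP (true, false, n, []) =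
    if '=' ∈ q then (true, true, n, rtaAft '=' q) else (true, false, n, []) := by
  induction q with
  | nil => simp
  | cons c t ih =>
    by_cases hc : c = '='
    · subst hc
      simp [List.foldl_cons, rtaP, rtaP3, rtaAft]
    · simp only [List.foldl_cons, rtaP, if_neg hc]
      simp only [Bool.not_true, Bool.false_eq_true, if_false, if_true, Bool.not_false]
      rw [ih]
      simp [rtaAft, List.mem_cons, hc, List.dropWhile_cons, Ne.symm hc]

lemma rtaP1 (q n : List Char) : q.foldl rtaP (false, false, n, []) =
    if ':' ∈ q then
      (if '=' ∈ rtaAft ':' q then (true, true, n ++ rtaBef ':' q, rtaAft '=' (rtaAft ':' q))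
       else (true, false, n ++ rtaBef ':' q, []))
    else (false, false, n ++ q, []) := by
  induction q generalizing n with
  | nil => simp
  | cons c t ih =>
    by_cases hc : c = ':'
    · subst hc
      simp [List.foldl_cons, rtaP, rtaP2, rtaAft, rtaBef, List.dropWhile_cons]
    · simp only [List.foldl_cons, rtaP, if_neg hc, Bool.not_false, if_true]
      rw [ih (n ++ [c])]
      simp [rtaAft, rtaBef, List.mem_cons, hc, List.dropWhile_cons, List.takeWhile_cons, Ne.symm hc]

lemma rtaScan_closed (q : List Char) :
    rtaScan q =
      if ':' ∈ q then
        (if '=' ∈ rtaAft ':' q then (true, true, rtaBef ':' q, rtaAft '=' (rtaAft ':' q))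
         else (true, false, rtaBef ':' q, []))
      else (false, false, q, []) := by
  have := rtaP1 q []
  simpa [rtaScan] using this

lemma rtaDropWhile_prefix {p : Char → Bool} {l l' : List Char}
    (h : l.dropWhile p = l) (hp : l' <+: l) : l'.dropWhile p = l' := by
  rw [List.dropWhile_eq_self_iff] at h ⊢
  intro hl
  have hlen : 0 < l.length := lt_of_lt_of_le hl hp.length_le
  have heq := hp.getElem (i := 0) hl
  rw [heq]
  exact h hlen

lemma rtaDropWhile_self (s : List Char) (p : Char → Bool) : (s.dropWhile p).dropWhile p = s.dropWhile p := by
  rw [List.dropWhile_eq_self_iff]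
  intro hl
  have hne : s.dropWhile p ≠ [] := by intro e; rw [e] at hl; simp at hl
  have := List.head_dropWhile_not p (l := s) hne
  simpa [List.getElem_zero_eq_head] using this

lemma rtaStrip_strip (s : List Char) : PySem.Chars.strip (PySem.Chars.strip s) = PySem.Chars.strip s := by
  simp only [PySem.Chars.strip, PySem.Chars.lstrip, PySem.Chars.rstrip]
  have h1 : (s.dropWhile PySem.Chars.isspace).dropWhile PySem.Chars.isspace = _ := rtaDropWhile_self s _
  -- y := lstrip s; goal about rstrip y
  set y := s.dropWhile PySem.Chars.isspace with hy
  have h2 : ((y.reverse.dropWhile PySem.Chars.isspace).reverse).dropWhile PySem.Chars.isspace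
      = (y.reverse.dropWhile PySem.Chars.isspace).reverse := by
    apply rtaDropWhile_prefix h1
    have h1' : (y.reverse.dropWhile PySem.Chars.isspace) <:+ y.reverse := List.dropWhile_suffix _
    simpa using h1'.reverse
  rw [h2]
  congr 1
  rw [List.reverse_reverse]
  exact rtaDropWhile_self _ _

lemma rtaLstrip_ws_prefix {w : List Char} (s : List Char) (hw : ∀ x ∈ w, PySem.Chars.isspace x = true) :
    PySem.Chars.lstrip (w ++ s) = PySem.Chars.lstrip s := by
  simp only [PySem.Chars.lstrip, List.dropWhile_append,
    List.dropWhile_eq_nil_iff.mpr hw, List.isEmpty_nil, if_true]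

lemma rtaRstrip_ws_suffix {w : List Char} (s : List Char) (hw : ∀ x ∈ w, PySem.Chars.isspace x = true) :
    PySem.Chars.rstrip (s ++ w) = PySem.Chars.rstrip s := by
  simp only [PySem.Chars.rstrip, List.reverse_append, List.dropWhile_append]
  rw [List.dropWhile_eq_nil_iff.mpr (by simpa using hw)]
  simp

lemma rtaStrip_ws_prefix {w : List Char} (s : List Char) (hw : ∀ x ∈ w, PySem.Chars.isspace x = true) :
    PySem.Chars.strip (w ++ s) = PySem.Chars.strip s := by
  simp only [PySem.Chars.strip, rtaLstrip_ws_prefix s hw]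

lemma rtaStrip_ws_suffix {w : List Char} (s : List Char) (hw : ∀ x ∈ w, PySem.Chars.isspace x = true) :
    PySem.Chars.strip (s ++ w) = PySem.Chars.strip s := by
  simp only [PySem.Chars.strip, PySem.Chars.lstrip, List.dropWhile_append]
  by_cases he : (s.dropWhile PySem.Chars.isspace).isEmpty
  · rw [if_pos he, List.dropWhile_eq_nil_iff.mpr hw]
    rw [List.isEmpty_iff] at he
    rw [he]
  · rw [if_neg he]
    exact rtaRstrip_ws_suffix _ hw

-- canonical decomposition
lemma rtaDec (s : List Char) : ∃ w m w2, s = w ++ m ++ w2 ∧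
    (∀ x ∈ w, PySem.Chars.isspace x = true) ∧ (∀ x ∈ w2, PySem.Chars.isspace x = true) ∧
    PySem.Chars.strip s = m := by
  refine ⟨s.takeWhile PySem.Chars.isspace,
          PySem.Chars.strip s,
          ((s.dropWhile PySem.Chars.isspace).reverse.takeWhile PySem.Chars.isspace).reverse, ?_, ?_, ?_, rfl⟩
  · simp only [PySem.Chars.strip, PySem.Chars.lstrip, PySem.Chars.rstrip]
    rw [List.append_assoc]
    conv_lhs => rw [← List.takeWhile_append_dropWhile (p := PySem.Chars.isspace) (l := s)]
    congr 1
    conv_lhs => rw [← List.reverse_reverse (s.dropWhile PySem.Chars.isspace),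
      ← List.takeWhile_append_dropWhile (p := PySem.Chars.isspace) (l := (s.dropWhile PySem.Chars.isspace).reverse)]
    rw [List.reverse_append]
  · exact fun x hx => List.mem_takeWhile_imp hx
  · intro x hx
    rw [List.mem_reverse] at hx
    exact List.mem_takeWhile_imp hx

-- bef/aft through whitespace and concatenation
lemma rtaBef_ws (c : Char) {w : List Char} (r : List Char) (hw : ∀ x ∈ w, (x ≠ c)) :
    rtaBef c (w ++ r) = w ++ rtaBef c r := by
  simp only [rtaBef, List.takeWhile_append]
  rw [List.takeWhile_eq_self_iff.mpr (by simpa using hw)]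
  simp

lemma rtaBef_mem (c : Char) {a : List Char} (b : List Char) (h : c ∈ a) :
    rtaBef c (a ++ b) = rtaBef c a := by
  simp only [rtaBef, List.takeWhile_append]
  rw [if_neg]
  intro hlen
  have hself : a.takeWhile (· ≠ c) = a := (List.takeWhile_prefix _).eq_of_length hlen
  have := List.mem_takeWhile_imp (x := c) (by rw [hself]; exact h)
  simp at this

lemma rtaAft_ws (c : Char) {w : List Char} (r : List Char) (hw : ∀ x ∈ w, (x ≠ c)) :
    rtaAft c (w ++ r) = rtaAft c r := by
  simp only [rtaAft, List.dropWhile_append]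
  rw [List.dropWhile_eq_nil_iff.mpr (by simpa using hw)]
  simp

lemma rtaAft_mem (c : Char) {a : List Char} (b : List Char) (h : c ∈ a) :
    rtaAft c (a ++ b) = rtaAft c a ++ b := by
  have hne : a.dropWhile (· ≠ c) ≠ [] := by
    intro e
    have := List.dropWhile_eq_nil_iff.mp e _ h
    simp at this
  simp only [rtaAft, List.dropWhile_append]
  rw [if_neg (by simpa using hne)]
  exact List.tail_append_of_ne_nil hne

lemma rtaMem_strip {c : Char} (hc : PySem.Chars.isspace c = false) (s : List Char) :
    c ∈ PySem.Chars.strip s ↔ c ∈ s := by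
  obtain ⟨w, m, w2, hs, hw, hw2, hm⟩ := rtaDec s
  rw [hm, hs]
  simp only [List.append_assoc, List.mem_append]
  constructor
  · exact fun hx => Or.inr (Or.inl hx)
  · rintro (hx | hx | hx)
    · exact absurd (hw _ hx) (by simp [hc])
    · exact hx
    · exact absurd (hw2 _ hx) (by simp [hc])

lemma rtaNotWsNe {c x : Char} (hc : PySem.Chars.isspace c = false) (hx : PySem.Chars.isspace x = true) : x ≠ c := by
  intro e; rw [e, hc] at hx; exact Bool.false_ne_true hx

lemma rtaBefStrip {c : Char} (hc : PySem.Chars.isspace c = false) {s : List Char} (h : c ∈ s) :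
    PySem.Chars.strip (rtaBef c (PySem.Chars.strip s)) = PySem.Chars.strip (rtaBef c s) := by
  obtain ⟨w, m, w2, hs, hw, hw2, hm⟩ := rtaDec s
  have hcm : c ∈ m := by rw [← hm]; exact (rtaMem_strip hc s).mpr h
  rw [hm, hs, List.append_assoc, rtaBef_ws c _ (fun x hx => rtaNotWsNe hc (hw x hx)),
      rtaBef_mem c _ hcm, rtaStrip_ws_prefix _ hw]

lemma rtaAftStrip {c : Char} (hc : PySem.Chars.isspace c = false) {s : List Char} (h : c ∈ s) :
    PySem.Chars.strip (rtaAft c (PySem.Chars.strip s)) = PySem.Chars.strip (rtaAft c s) := by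
  obtain ⟨w, m, w2, hs, hw, hw2, hm⟩ := rtaDec s
  have hcm : c ∈ m := by rw [← hm]; exact (rtaMem_strip hc s).mpr h
  rw [hm, hs, List.append_assoc, rtaAft_ws c _ (fun x hx => rtaNotWsNe hc (hw x hx)),
      rtaAft_mem c _ hcm, rtaStrip_ws_suffix _ hw2]

lemma rtaMemAft {c d : Char} (hc : PySem.Chars.isspace c = false) (hd : PySem.Chars.isspace d = false)
    {s : List Char} (h : c ∈ s) : d ∈ rtaAft c (PySem.Chars.strip s) ↔ d ∈ rtaAft c s := by
  obtain ⟨w, m, w2, hs, hw, hw2, hm⟩ := rtaDec s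
  have hcm : c ∈ m := by rw [← hm]; exact (rtaMem_strip hc s).mpr h
  rw [hm, hs, List.append_assoc, rtaAft_ws c _ (fun x hx => rtaNotWsNe hc (hw x hx)),
      rtaAft_mem c _ hcm, List.mem_append]
  constructor
  · exact Or.inl
  · rintro (h2 | h2)
    · exact h2
    · exact absurd (hw2 _ h2) (by simp [hd])

lemma rtaIsIn_true {c : Char} {s : List Char} (h : c ∈ s) : PySem.Chars.isIn [c] s = true := by
  rw [PySem.Chars.isIn_iff_infix _ _]; exact (List.singleton_infix_iff c s).mpr h

lemma rtaIsIn_false {c : Char} {s : List Char} (h : c ∉ s) : PySem.Chars.isIn [c] s = false := by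
  rw [Bool.eq_false_iff]
  intro e
  exact h ((List.singleton_infix_iff c s).mp ((PySem.Chars.isIn_iff_infix _ _).mp e))

lemma rtaClean_eq (p : List Char) :
    rtaClean p =
      (if ':' ∈ PySem.Chars.strip p then
        (let name := PySem.Chars.strip (rtaBef ':' (PySem.Chars.strip p));
         let ann := PySem.Chars.strip (rtaAft ':' (PySem.Chars.strip p));
         if '=' ∈ ann then name ++ ['='] ++ PySem.Chars.strip (rtaAft '=' ann) else name)
      else PySem.Chars.strip p) := by
  by_cases h : ':' ∈ PySem.Chars.strip p
  · have hsplit := rtaSplit_mem ':' _ h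
    by_cases he : '=' ∈ PySem.Chars.strip (rtaAft ':' (PySem.Chars.strip p))
    · have hsp2 := rtaSplit_mem '=' _ he
      simp only [rtaClean, rtaAnnot, rtaIsIn_true h, hsplit, rtaIsIn_true he, hsp2,
        if_pos h, if_pos he, List.getD_cons_zero, List.getD_cons_succ, if_true]
      cases PySem.Chars.startswith (PySem.Chars.strip p) ['*'] <;> simp
    · simp only [rtaClean, rtaAnnot, rtaIsIn_true h, hsplit, rtaIsIn_false he,
        if_pos h, if_neg he, List.getD_cons_zero, List.getD_cons_succ, if_true, Bool.false_eq_true, if_false]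
      cases PySem.Chars.startswith (PySem.Chars.strip p) ['*'] <;> simp
  · simp only [rtaClean, rtaAnnot, rtaIsIn_false h, if_neg h, Bool.false_eq_true, if_false]
    cases PySem.Chars.startswith (PySem.Chars.strip p) ['*'] <;> simp

theorem rtaFin_eq_clean (q : List Char) :
    rtaFin (rtaScan q).1 (rtaScan q).2.1 (rtaScan q).2.2.1 (rtaScan q).2.2.2
      = rtaClean (PySem.Chars.strip q) := by
  rw [rtaClean_eq, rtaStrip_strip, rtaScan_closed]
  have hws : PySem.Chars.isspace ':' = false := by decide
  have hwe : PySem.Chars.isspace '=' = false := by decide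
  by_cases h : ':' ∈ q
  · have h' : ':' ∈ PySem.Chars.strip q := (rtaMem_strip hws q).mpr h
    have hmem : ('=' ∈ PySem.Chars.strip (rtaAft ':' (PySem.Chars.strip q))) ↔ '=' ∈ rtaAft ':' q := by
      rw [rtaMem_strip hwe, rtaMemAft hws hwe h]
    by_cases he : '=' ∈ rtaAft ':' q
    · simp only [if_pos h, if_pos h', if_pos he, if_pos (hmem.mpr he), rtaFin,
        Bool.and_self, if_true]
      rw [rtaBefStrip hws h, rtaAftStrip hws h, rtaAftStrip hwe he]
    · simp only [if_pos h, if_pos h', if_neg he, if_neg (fun hx => he (hmem.mp hx)), rtaFin,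
        Bool.and_false, Bool.false_eq_true, if_false]
      rw [rtaBefStrip hws h]
  · have h' : ':' ∉ PySem.Chars.strip q := fun hx => h ((rtaMem_strip hws q).mp hx)
    simp [if_neg h, if_neg h', rtaFin]

lemma rtaStepB_noncomma (st : RtaSt) (c : Char) (h : ¬ (c = ',' ∧ st.depth = 0)) :
    rtaStepB st c =
      { out := st.out,
        depth := (if c ∈ ['[', '(', '{'] then st.depth + 1
                  else if c ∈ [']', ')', '}'] then st.depth - 1 else st.depth),
        col := (rtaP (st.col, st.eq, st.name, st.dfl) c).1,
        eq := (rtaP (st.col, st.eq, st.name, st.dfl) c).2.1,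
        name := (rtaP (st.col, st.eq, st.name, st.dfl) c).2.2.1,
        dfl := (rtaP (st.col, st.eq, st.name, st.dfl) c).2.2.2 } := by
  simp only [rtaStepB, rtaP, if_neg h]
  split_ifs <;> rfl

lemma rtaMain (l : List Char) (parts : List (List Char)) (cur : List Char) (bc : Int) :
    l.foldl rtaStepB
      ⟨parts.map rtaClean, bc, (rtaScan cur).1, (rtaScan cur).2.1, (rtaScan cur).2.2.1, (rtaScan cur).2.2.2⟩ =
      (let a := l.foldl rtaStepA (parts, cur, bc)
       ⟨a.1.map rtaClean, a.2.2, (rtaScan a.2.1).1, (rtaScan a.2.1).2.1, (rtaScan a.2.1).2.2.1, (rtaScan a.2.1).2.2.2⟩) := by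
  induction l generalizing parts cur bc with
  | nil => simp
  | cons c t ih =>
    by_cases hc : c = ',' ∧ bc = 0
    · simp only [List.foldl_cons]
      rw [show rtaStepA (parts, cur, bc) c = (parts ++ [PySem.Chars.strip cur], [], bc) from by
            simp [rtaStepA, if_pos hc]]
      rw [show rtaStepB ⟨parts.map rtaClean, bc, (rtaScan cur).1, (rtaScan cur).2.1, (rtaScan cur).2.2.1, (rtaScan cur).2.2.2⟩ c
            = ⟨parts.map rtaClean ++ [rtaFin (rtaScan cur).1 (rtaScan cur).2.1 (rtaScan cur).2.2.1 (rtaScan cur).2.2.2], bc, false, false, [], []⟩ from by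
            simp [rtaStepB, if_pos hc]]
      have := ih (parts ++ [PySem.Chars.strip cur]) [] bc
      rw [rtaFin_eq_clean]
      simpa [rtaScan] using this
    · simp only [List.foldl_cons]
      rw [show rtaStepA (parts, cur, bc) c
            = (parts, cur ++ [c], (if c ∈ ['[', '(', '{'] then bc + 1 else if c ∈ [']', ')', '}'] then bc - 1 else bc)) from by
            simp [rtaStepA, if_neg hc]]
      rw [rtaStepB_noncomma _ _ hc]
      have hscan : rtaScan (cur ++ [c]) = rtaP (rtaScan cur) c := by
        simp [rtaScan, List.foldl_append]
      have := ih parts (cur ++ [c]) (if c ∈ ['[', '(', '{'] then bc + 1 else if c ∈ [']', ')', '}'] then bc - 1 else bc)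
      rw [hscan] at this
      simpa using this

-- ===== VERDICT (by name: the statement is the Claim_ definition above) =====
theorem remove_type_annotations_spec : Claim_equal_remove_type_annotations := by
  intro params _
  unfold Spec_remove_type_annotations
  by_cases hp : params = ""
  · subst hp; rfl
  · unfold remove_type_annotations remove_type_annotations_alt
    rw [if_neg hp]
    have hmain : params.toList.foldl rtaStepB ⟨[], 0, false, false, [], []⟩ =
        (let a := params.toList.foldl rtaStepA ([], [], 0)
         RtaSt.mk (a.1.map rtaClean) a.2.2 (rtaScan a.2.1).1 (rtaScan a.2.1).2.1
           (rtaScan a.2.1).2.2.1 (rtaScan a.2.1).2.2.2) := by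
      have := rtaMain params.toList [] [] 0
      simpa [rtaScan] using this
    rw [hmain]
    rcases hA : params.toList.foldl rtaStepA ([], [], 0) with ⟨P, C, B⟩
    by_cases hC : C = []
    · subst hC
      simp [rtaScan]
    · have hcond : ((rtaScan C).1 || !(rtaScan C).2.2.1.isEmpty) = true := by
        rw [rtaScan_closed]
        by_cases h : ':' ∈ C
        · by_cases he : '=' ∈ rtaAft ':' C <;> simp [h, he]
        · simp [h, hC]
      simp only [hA, if_pos hC, hcond, if_true, ne_eq, not_false_iff, List.map_append, List.map_cons,
        List.map_nil, rtaFin_eq_clean]
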